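-- pv_equiv track=rewrite | github.com/CodeWithJuber/mizan | backend/memory/quaternary.py | verify_and_correct
-- ===== SOURCE A (Python) =====
-- QUAT_MAP = {0b00: "A", 0b01: "C", 0b10: "G", 0b11: "T"}
--
-- QUAT_REVERSE = {"A": 0b00, "C": 0b01, "G": 0b10, "T": 0b11}
--
-- VALID_SYMBOLS = frozenset("ACGT")
--
-- def compute_parity_symbol(codon: str) -> str:
--     """Compute a parity symbol for a codon (XOR of three symbols).
--
--     >>> compute_parity_symbol('ACG')
--     'C'
--     """
--     if len(codon) != 3 or not all(c in VALID_SYMBOLS for c in codon):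
--         raise ValueError(f"Invalid codon: {codon!r}")
--     values = [QUAT_REVERSE[c] for c in codon]
--     parity = values[0] ^ values[1] ^ values[2]
--     return QUAT_MAP[parity & 0b11]
--
-- def verify_and_correct(encoded: str) -> tuple[str, bool, int]:
--     """Verify parity and detect errors.
--
--     Returns (data_without_parity, is_valid, errors_detected).
--     """
--     blocks = [encoded[i : i + 4] for i in range(0, len(encoded), 4)]
--     corrected_data = []
--     errors = 0
--
--     for block in blocks:
--         if len(block) < 4:
--             corrected_data.append(block[:3] if len(block) >= 3 else block)
--             continue
--
--         codon = block[:3]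
--         stored_parity = block[3]
--         expected_parity = compute_parity_symbol(codon)
--
--         if stored_parity == expected_parity:
--             corrected_data.append(codon)
--         else:
--             errors += 1
--             # Error detected — pass through data (correction requires
--             # additional redundancy beyond single parity)
--             corrected_data.append(codon)
--
--     return "".join(corrected_data), errors == 0, errors
-- ===== SOURCE B (Python) =====
-- QUAT_MAP = {0b00: "A", 0b01: "C", 0b10: "G", 0b11: "T"}
--
-- QUAT_REVERSE = {"A": 0b00, "C": 0b01, "G": 0b10, "T": 0b11}
--
-- VALID_SYMBOLS = frozenset("ACGT")
--
-- def compute_parity_symbol(codon: str) -> str: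
--     if len(codon) != 3 or not all(c in VALID_SYMBOLS for c in codon):
--         raise ValueError(f"Invalid codon: {codon!r}")
--     values = [QUAT_REVERSE[c] for c in codon]
--     parity = values[0] ^ values[1] ^ values[2]
--     return QUAT_MAP[parity & 0b11]
--
-- def verify_and_correct(encoded: str) -> tuple[str, bool, int]:
--     # Data in closed form: every position except the parity slots (index % 4 == 3).
--     data = "".join(c for i, c in enumerate(encoded) if i % 4 != 3)
--     # Separate validation pass over the full 4-symbol blocks only.
--     errors = 0
--     for i in range(0, len(encoded) - 3, 4):
--         if encoded[i + 3] != compute_parity_symbol(encoded[i:i + 3]):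
--             errors += 1
--     return data, errors == 0, errors
-- ===== Notes on version B (the rewrite author's own statement) =====
-- stated objective: alternative
-- what changed: B computes the returned data string in one closed-form pass (keep every character whose index is not a parity slot, i % 4 != 3) instead of assembling block[:3] pieces block by block, and counts parity errors in a separate index loop over the full 4-symbol blocks only; Pre_ excludes strings where a full block's codon contains an invalid nucleotide symbol, on which A (and B) raise ValueError.
import Mathlib
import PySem

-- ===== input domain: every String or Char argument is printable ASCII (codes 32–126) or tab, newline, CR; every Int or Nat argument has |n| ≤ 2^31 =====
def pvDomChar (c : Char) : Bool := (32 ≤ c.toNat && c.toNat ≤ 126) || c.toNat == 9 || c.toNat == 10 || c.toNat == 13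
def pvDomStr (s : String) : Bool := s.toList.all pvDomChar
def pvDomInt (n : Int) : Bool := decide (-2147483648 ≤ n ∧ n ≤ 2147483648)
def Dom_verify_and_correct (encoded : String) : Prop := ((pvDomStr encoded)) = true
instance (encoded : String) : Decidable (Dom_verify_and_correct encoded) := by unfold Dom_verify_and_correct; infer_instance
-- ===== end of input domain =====

-- B replaces A's single block loop (which both builds block[:3] pieces and checks parity) by a
-- closed-form data pass keeping every index with i % 4 ≠ 3 plus a separate error loop over the
-- full-block start indices; same values everywhere A returns (objective: alternative decomposition).

-- ===== PORT A =====
-- shared module helper: compute_parity_symbol; `none` is exactly Python's ValueError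
def pvQuatRev (c : Char) : Nat :=
  if c = 'A' then 0 else if c = 'C' then 1 else if c = 'G' then 2 else 3

def pvQuatMap (n : Nat) : Char :=
  if n = 0 then 'A' else if n = 1 then 'C' else if n = 2 then 'G' else 'T'

def pvValid (c : Char) : Bool := c == 'A' || c == 'C' || c == 'G' || c == 'T'

def compute_parity_symbol? (codon : List Char) : Option Char :=
  if codon.length = 3 ∧ codon.all pvValid then
    let values := codon.map pvQuatRev
    some (pvQuatMap ((values.getD 0 0 ^^^ values.getD 1 0 ^^^ values.getD 2 0) &&& 3))
  else none

-- A's `for block in blocks` loop; `none` propagates the ValueError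
def pvVacLoop : List (List Char) → List (List Char) → Nat → Option (List (List Char) × Nat)
  | [], corrected, errors => some (corrected, errors)
  | block :: rest, corrected, errors =>
    if block.length < 4 then
      pvVacLoop rest (corrected ++ [if 3 ≤ block.length then PySem.List.slice block none (some 3) else block]) errors
    else
      match compute_parity_symbol? (PySem.List.slice block none (some 3)) with
      | none => none
      | some expected =>
        if (PySem.List.pyGet? block 3).getD ' ' == expected then
          pvVacLoop rest (corrected ++ [PySem.List.slice block none (some 3)]) errors
        else
          pvVacLoop rest (corrected ++ [PySem.List.slice block none (some 3)]) (errors + 1)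

def verify_and_correct (encoded : String) : String × Bool × Int :=
  let s := encoded.toList
  let blocks := (PySem.List.pyRange 0 s.length 4).map (fun i => PySem.List.slice s (some i) (some (i + 4)))
  match pvVacLoop blocks [] 0 with
  | none => ("", false, 0)  -- ValueError; excluded by Pre_
  | some (corrected, errors) => (String.mk (PySem.Chars.join [] corrected), errors == 0, (errors : Int))

-- ===== PORT B =====
-- B's error loop over the full-block start indices range(0, len-3, 4)
def pvAltErrLoop (s : List Char) : List Int → Nat → Option Nat
  | [], errors => some errors
  | i :: rest, errors =>
    match compute_parity_symbol? (PySem.List.slice s (some i) (some (i + 3))) with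
    | none => none
    | some expected =>
      if (PySem.List.pyGet? s (i + 3)).getD ' ' == expected then pvAltErrLoop s rest errors
      else pvAltErrLoop s rest (errors + 1)

def verify_and_correct_alt (encoded : String) : String × Bool × Int :=
  let s := encoded.toList
  let data := ((PySem.List.enumerate s).filter (fun p => PySem.Int.mod p.1 4 != 3)).map (·.2)
  match pvAltErrLoop s (PySem.List.pyRange 0 ((s.length : Int) - 3) 4) 0 with
  | none => ("", false, 0)  -- ValueError; excluded by Pre_
  | some errors => (String.mk data, errors == 0, (errors : Int))

-- ===== PRECONDITION & SPEC =====
-- Pre_ excludes exactly the inputs on which Python A raises ValueError: an invalid nucleotide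
-- symbol at a codon (non-parity) position of a full 4-symbol block.
def Pre_verify_and_correct (encoded : String) : Prop :=
  ∀ i, (h : i < encoded.toList.length) → i % 4 ≠ 3 → (i / 4) * 4 + 4 ≤ encoded.toList.length →
    pvValid encoded.toList[i] = true

instance (encoded : String) : Decidable (Pre_verify_and_correct encoded) := by
  unfold Pre_verify_and_correct; infer_instance

def pvWitness_verify_and_correct : String := "ACGCTT"

def Spec_verify_and_correct (encoded : String) (out : String × Bool × Int) : Prop := out = verify_and_correct_alt encoded
instance (encoded : String) (out : String × Bool × Int) : Decidable (Spec_verify_and_correct encoded out) := by unfold Spec_verify_and_correct; infer_instance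

-- ===== CLAIM (what is proved, stated in full; the proofs are below) =====
def Claim_equal_verify_and_correct : Prop := ∀ (encoded : String), Dom_verify_and_correct encoded → Pre_verify_and_correct encoded → Spec_verify_and_correct encoded (verify_and_correct encoded)

-- ===== LEMMAS AND PROOFS =====

-- common reference recursion: one 4-symbol block at a time
def vcRef (s : List Char) : Option (List (List Char) × Nat) :=
  if s.length = 0 then some ([], 0)
  else if s.length < 4 then some ([s.take 3], 0)
  else
    (compute_parity_symbol? (s.take 3)).bind fun expected =>
      (vcRef (s.drop 4)).map fun p =>
        (s.take 3 :: p.1, (if (PySem.List.pyGet? s 3).getD ' ' == expected then 0 else 1) + p.2)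
termination_by s.length
decreasing_by simp; omega

lemma pyRange4_decomp (m : Int) (h : 0 < m) :
    PySem.List.pyRange 0 m 4 = 0 :: (PySem.List.pyRange 0 (m - 4) 4).map (· + 4) := by
  rw [PySem.List.pyRange_of_pos _ _ (by norm_num), PySem.List.pyRange_of_pos _ _ (by norm_num)]
  have hc : (if (0:Int) < m then ((m - 0 + 4 - 1) / 4).toNat else 0) =
      (if (0:Int) < m - 4 then ((m - 4 - 0 + 4 - 1) / 4).toNat else 0) + 1 := by
    split_ifs <;> omega
  rw [hc, List.range_succ_eq_map]
  simp only [List.map_cons, List.map_map, Nat.cast_zero]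
  congr 1

lemma shift_slice (s : List Char) (a b : Int) (ha : 0 ≤ a) (hb : 0 ≤ b) :
    PySem.List.slice s (some (a + 4)) (some (b + 4)) = PySem.List.slice (s.drop 4) (some a) (some b) := by
  lift a to Nat using ha
  lift b to Nat using hb
  have h1 : (a : Int) + 4 = ((a + 4 : Nat) : Int) := by push_cast; ring
  have h2 : (b : Int) + 4 = ((b + 4 : Nat) : Int) := by push_cast; ring
  rw [h1, h2, PySem.List.slice_natCast, PySem.List.slice_natCast, List.drop_drop]
  congr 1
  · omega
  · congr 1
    omega

lemma shift_get (s : List Char) (i : Int) (hi : 0 ≤ i) :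
    PySem.List.pyGet? s (i + 4) = PySem.List.pyGet? (s.drop 4) i := by
  lift i to Nat using hi
  have h1 : (i : Int) + 4 = ((i + 4 : Nat) : Int) := by push_cast; ring
  rw [h1, PySem.List.pyGet?_natCast, PySem.List.pyGet?_natCast, List.getElem?_drop]
  congr 1
  omega

lemma blocks_decomp (s : List Char) (h : 4 ≤ s.length) :
    (PySem.List.pyRange 0 s.length 4).map (fun i => PySem.List.slice s (some i) (some (i + 4))) =
      s.take 4 :: (PySem.List.pyRange 0 (s.drop 4).length 4).map
        (fun i => PySem.List.slice (s.drop 4) (some i) (some (i + 4))) := by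
  have hlen : ((s.drop 4).length : Int) = (s.length : Int) - 4 := by
    simp only [List.length_drop]; omega
  rw [pyRange4_decomp _ (by exact_mod_cast Nat.lt_of_lt_of_le (by norm_num) h), List.map_cons, List.map_map, hlen]
  congr 1
  · have h0 : ((0:Int) + 4) = ((4:Nat) : Int) := by norm_num
    have h00 : (0:Int) = ((0:Nat) : Int) := by norm_num
    rw [h0, h00, PySem.List.slice_natCast]
    simp
  · apply List.map_congr_left
    intro i hi
    have hi0 : 0 ≤ i := ((PySem.List.mem_pyRange_iff_of_pos (by norm_num) i).mp hi).1
    simp only [Function.comp_apply]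
    rw [show i + 4 + (4:Int) = (i + 4) + 4 from rfl, shift_slice s i (i + 4) hi0 (by omega)]

lemma slice_zero_four (s : List Char) : PySem.List.slice s (some 0) (some (0 + 4)) = s.take 4 := by
  have h0 : (0:Int) = ((0:Nat):Int) := rfl
  have h4 : (0:Int) + 4 = ((4:Nat):Int) := by norm_num
  rw [h4, h0, PySem.List.slice_natCast]
  simp

lemma pyRange_empty (m : Int) (hm : m ≤ 0) : PySem.List.pyRange 0 m 4 = [] := by
  rw [PySem.List.pyRange_of_pos _ _ (by norm_num : (0:Int) < 4)]
  rw [if_neg (by omega)]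
  simp

lemma slice_take3 (s : List Char) : PySem.List.slice s none (some 3) = s.take 3 := by
  rw [PySem.List.slice_to _ (by norm_num)]
  rfl

lemma vacLoop_ref_aux : ∀ (n : Nat) (s : List Char), s.length ≤ n → ∀ (corrected : List (List Char)) (errors : Nat),
    pvVacLoop ((PySem.List.pyRange 0 s.length 4).map (fun i => PySem.List.slice s (some i) (some (i + 4)))) corrected errors =
      (vcRef s).map (fun p => (corrected ++ p.1, errors + p.2)) := by
  intro n
  induction n with
  | zero =>
    intro s hs corrected errors
    have : s = [] := List.length_eq_zero_iff.mp (by omega)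
    subst this
    simp [pyRange_empty, pvVacLoop, vcRef]
  | succ n ih =>
    intro s hs corrected errors
    rcases Nat.eq_zero_or_pos s.length with h0 | hpos
    · have : s = [] := List.length_eq_zero_iff.mp h0
      subst this
      simp [pyRange_empty, pvVacLoop, vcRef]
    by_cases hsm : s.length < 4
    · -- single short trailing block
      have hp1 : (0:Int) < (s.length : Int) := by omega
      have hp2 : ((s.length : Int) - 4) ≤ 0 := by omega
      rw [pyRange4_decomp _ hp1, pyRange_empty _ hp2]
      simp only [List.map_nil, List.map_cons, slice_zero_four]
      rw [List.take_of_length_le (by omega)]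
      simp only [pvVacLoop, if_pos hsm]
      rw [vcRef]
      rw [if_neg (show ¬ s.length = 0 by omega), if_pos hsm]
      simp only [Option.map_some]
      split_ifs with h3
      · rw [slice_take3]; simp
      · rw [List.take_of_length_le (by omega)]; simp
    · -- full leading block
      replace hsm : 4 ≤ s.length := by omega
      rw [blocks_decomp s hsm]
      have hlt : (s.take 4).length = 4 := by simp [List.length_take]; omega
      simp only [pvVacLoop, hlt]
      rw [if_neg (by omega)]
      have hcodon : PySem.List.slice (s.take 4) none (some 3) = s.take 3 := by
        rw [slice_take3, List.take_take]
        norm_num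
      have hstored : PySem.List.pyGet? (s.take 4) 3 = PySem.List.pyGet? s 3 := by
        have h3 : (3:Int) = ((3:Nat):Int) := rfl
        rw [h3, PySem.List.pyGet?_natCast, PySem.List.pyGet?_natCast]
        rw [List.getElem?_take_of_lt (by norm_num)]
      rw [hcodon, hstored]
      rw [vcRef]
      rw [if_neg (show ¬ s.length = 0 by omega), if_neg (show ¬ s.length < 4 by omega)]
      cases hcps : compute_parity_symbol? (s.take 3) with
      | none => simp
      | some expected =>
        simp only [Option.bind_some]
        have hih := fun e => ih (s.drop 4) (by simp [List.length_drop]; omega) (corrected ++ [s.take 3]) e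
        split_ifs with hpar
        · rw [hih errors]
          cases vcRef (s.drop 4) with
          | none => simp
          | some q =>
            simp [List.append_assoc]
        · rw [hih (errors + 1)]
          cases vcRef (s.drop 4) with
          | none => simp
          | some q =>
            simp [List.append_assoc, Nat.add_assoc]

lemma vacLoop_ref (s : List Char) (corrected : List (List Char)) (errors : Nat) :
    pvVacLoop ((PySem.List.pyRange 0 s.length 4).map (fun i => PySem.List.slice s (some i) (some (i + 4)))) corrected errors =
      (vcRef s).map (fun p => (corrected ++ p.1, errors + p.2)) :=
  vacLoop_ref_aux s.length s le_rfl corrected errors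

lemma altErr_shift (s : List Char) (idxs : List Int) (errors : Nat)
    (h : ∀ i ∈ idxs, 0 ≤ i) :
    pvAltErrLoop s (idxs.map (· + 4)) errors = pvAltErrLoop (s.drop 4) idxs errors := by
  induction idxs generalizing errors with
  | nil => rfl
  | cons i rest ih =>
    have hi0 : 0 ≤ i := h i (by simp)
    have hrest : ∀ j ∈ rest, 0 ≤ j := fun j hj => h j (by simp [hj])
    simp only [List.map_cons, pvAltErrLoop]
    rw [show i + 4 + (3:Int) = (i + 3) + 4 by ring]
    rw [shift_slice s i (i + 3) hi0 (by omega), shift_get s (i + 3) (by omega)]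
    cases compute_parity_symbol? (PySem.List.slice (s.drop 4) (some i) (some (i + 3))) with
    | none => rfl
    | some expected =>
      simp only []
      split <;> exact ih _ hrest

lemma slice_zero_three (s : List Char) : PySem.List.slice s (some 0) (some (0 + 3)) = s.take 3 := by
  have h0 : (0:Int) = ((0:Nat):Int) := rfl
  have h3 : (0:Int) + 3 = ((3:Nat):Int) := by norm_num
  rw [h3, h0, PySem.List.slice_natCast]
  simp

lemma altErr_ref_aux : ∀ (n : Nat) (s : List Char), s.length ≤ n → ∀ (errors : Nat),
    pvAltErrLoop s (PySem.List.pyRange 0 ((s.length : Int) - 3) 4) errors =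
      (vcRef s).map (fun p => errors + p.2) := by
  intro n
  induction n with
  | zero =>
    intro s hs errors
    have : s = [] := List.length_eq_zero_iff.mp (by omega)
    subst this
    rw [pyRange_empty _ (by norm_num)]
    simp [pvAltErrLoop, vcRef]
  | succ n ih =>
    intro s hs errors
    by_cases hsm : s.length < 4
    · rw [pyRange_empty _ (by omega)]
      simp only [pvAltErrLoop]
      rw [vcRef]
      split_ifs <;> simp
    · replace hsm : 4 ≤ s.length := by omega
      rw [pyRange4_decomp _ (show (0:Int) < (s.length : Int) - 3 by omega)]
      simp only [pvAltErrLoop, slice_zero_three]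
      rw [show (0:Int) + 3 = 3 by norm_num]
      rw [vcRef]
      rw [if_neg (show ¬ s.length = 0 by omega), if_neg (show ¬ s.length < 4 by omega)]
      cases hcps : compute_parity_symbol? (s.take 3) with
      | none => simp
      | some expected =>
        simp only [Option.bind_some]
        have hmem : ∀ i ∈ PySem.List.pyRange 0 ((s.length : Int) - 3 - 4) 4, 0 ≤ i := by
          intro i hi
          exact ((PySem.List.mem_pyRange_iff_of_pos (by norm_num) i).mp hi).1
        have hlen4 : (s.length : Int) - 3 - 4 = ((s.drop 4).length : Int) - 3 := by
          simp only [List.length_drop]; omega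
        have hih := fun e => ih (s.drop 4) (by simp [List.length_drop]; omega) e
        split_ifs with hpar
        · rw [altErr_shift s _ _ hmem, hlen4, hih errors]
          cases vcRef (s.drop 4) with
          | none => simp
          | some q => simp
        · rw [altErr_shift s _ _ hmem, hlen4, hih (errors + 1)]
          cases vcRef (s.drop 4) with
          | none => simp
          | some q => simp [Nat.add_assoc]

lemma altErr_ref (s : List Char) (errors : Nat) :
    pvAltErrLoop s (PySem.List.pyRange 0 ((s.length : Int) - 3) 4) errors =
      (vcRef s).map (fun p => errors + p.2) :=
  altErr_ref_aux s.length s le_rfl errors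

lemma data_step (s : List Char) (k : Int) (hk : PySem.Int.mod k 4 = 0) :
    ((PySem.List.enumerate s k).filter (fun p => PySem.Int.mod p.1 4 != 3)).map (·.2) =
      if s.length < 4 then s
      else s.take 3 ++ ((PySem.List.enumerate (s.drop 4) (k + 4)).filter (fun p => PySem.Int.mod p.1 4 != 3)).map (·.2) := by
  have hk' : k % 4 = 0 := by
    rw [PySem.Int.mod_eq_emod_of_pos (by norm_num)] at hk; exact hk
  have h0 : (k % 4 != 3) = true := by simp; omega
  have h1 : ((k + 1) % 4 != 3) = true := by simp; omega
  have h2 : ((k + 1 + 1) % 4 != 3) = true := by simp; omega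
  have h3 : ((k + 1 + 1 + 1) % 4 != 3) = false := by simp; omega
  have hmod : ∀ a : Int, PySem.Int.mod a 4 = a % 4 := fun a =>
    PySem.Int.mod_eq_emod_of_pos (by norm_num)
  rcases s with _ | ⟨a, _ | ⟨b, _ | ⟨c, _ | ⟨d, r⟩⟩⟩⟩
  · simp [PySem.List.enumerate]
  · simp [PySem.List.enumerate, h0]
  · simp [PySem.List.enumerate, h0, h1]
  · simp [PySem.List.enumerate, h0, h1, h2]
  · have hlen : ¬ (a :: b :: c :: d :: r).length < 4 := by simp
    rw [if_neg hlen]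
    have hk4 : k + 1 + 1 + 1 + 1 = k + 4 := by ring
    simp only [PySem.List.enumerate, List.filter_cons, hmod, h0, h1, h2, h3, hk4]
    simp

lemma join_nil_cons (x : List Char) (l : List (List Char)) :
    PySem.Chars.join [] (x :: l) = x ++ PySem.Chars.join [] l := by
  cases l with
  | nil => rw [PySem.Chars.join_singleton, PySem.Chars.join_nil]; simp
  | cons y t => rw [PySem.Chars.join_cons_cons]; simp

lemma data_ref_aux : ∀ (n : Nat) (s : List Char), s.length ≤ n → ∀ (k : Int), PySem.Int.mod k 4 = 0 →
    ∀ (p : List (List Char) × Nat), vcRef s = some p →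
    PySem.Chars.join [] p.1 = ((PySem.List.enumerate s k).filter (fun q => PySem.Int.mod q.1 4 != 3)).map (·.2) := by
  intro n
  induction n with
  | zero =>
    intro s hs k hk p hp
    have hnil : s = [] := List.length_eq_zero_iff.mp (by omega)
    subst hnil
    rw [vcRef] at hp
    simp at hp
    rw [← hp]
    simp [PySem.List.enumerate, PySem.Chars.join_nil]
  | succ n ih =>
    intro s hs k hk p hp
    rw [data_step s k hk]
    by_cases h0 : s.length = 0
    · have hnil : s = [] := List.length_eq_zero_iff.mp h0
      subst hnil
      rw [vcRef] at hp
      simp at hp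
      rw [← hp]
      simp [PySem.Chars.join_nil]
    by_cases hsm : s.length < 4
    · rw [if_pos hsm]
      rw [vcRef, if_neg h0, if_pos hsm] at hp
      have hp1 : p.1 = [s.take 3] := by
        cases hp; rfl
      rw [hp1, PySem.Chars.join_singleton, List.take_of_length_le (by omega)]
    · rw [if_neg hsm]
      rw [vcRef, if_neg h0, if_neg hsm] at hp
      cases hcps : compute_parity_symbol? (s.take 3) with
      | none => rw [hcps] at hp; simp at hp
      | some expected =>
        rw [hcps] at hp
        cases hq : vcRef (s.drop 4) with
        | none => rw [hq] at hp; simp at hp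
        | some q =>
          rw [hq] at hp
          simp only [Option.bind_some, Option.map_some, Option.some_inj] at hp
          rw [← hp]
          rw [join_nil_cons]
          have hk4 : PySem.Int.mod (k + 4) 4 = 0 := by
            rw [PySem.Int.mod_eq_emod_of_pos (by norm_num)]
            rw [PySem.Int.mod_eq_emod_of_pos (by norm_num)] at hk
            omega
          rw [ih (s.drop 4) (by simp [List.length_drop]; omega) (k + 4) hk4 q hq]

lemma data_ref (s : List Char) (k : Int) (hk : PySem.Int.mod k 4 = 0) (p : List (List Char) × Nat)
    (hp : vcRef s = some p) :
    PySem.Chars.join [] p.1 = ((PySem.List.enumerate s k).filter (fun q => PySem.Int.mod q.1 4 != 3)).map (·.2) :=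
  data_ref_aux s.length s le_rfl k hk p hp

-- ===== VERDICT (by name: the statement is the Claim_ definition above) =====
theorem verify_and_correct_spec : Claim_equal_verify_and_correct := by
  intro encoded _ _
  unfold Spec_verify_and_correct verify_and_correct verify_and_correct_alt
  simp only [vacLoop_ref, altErr_ref]
  cases hv : vcRef encoded.toList with
  | none => simp
  | some p =>
    simp only [Option.map_some, List.nil_append]
    rw [data_ref encoded.toList 0 (by decide) p hv]
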